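-- pv_equiv track=rewrite | github.com/visual-xai-for-time-series/counterfactual-explanations-for-time-series | cfts/cf_discox/discox.py | ind_list_to_intervals
-- ===== SOURCE A (Python) =====
-- def ind_list_to_intervals(lst):
--     """
--     Split list of indices into separate contiguous intervals.
--
--     Args:
--         lst: List of indices
--
--     Returns:
--         intervals: List of interval index lists
--         intervals_inds: List of positions in original list
--     """
--     if len(lst) == 0:
--         return [], []
--
--     intervals = []
--     intervals_inds = []
--     curr_interval = []
--     curr_interval_inds = []
--
--     prev_i = lst[0]
--     curr_interval.append(prev_i)
--     curr_interval_inds.append(0)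
--
--     for ind, i in enumerate(lst[1:]):
--         if i == prev_i + 1:
--             curr_interval.append(i)
--             curr_interval_inds.append(ind + 1)
--         else:
--             intervals.append(curr_interval)
--             intervals_inds.append(curr_interval_inds)
--             curr_interval = [i]
--             curr_interval_inds = [ind + 1]
--         prev_i = i
--
--     intervals.append(curr_interval)
--     intervals_inds.append(curr_interval_inds)
--
--     return intervals, intervals_inds
-- ===== SOURCE B (Python) =====
-- def ind_list_to_intervals(lst):
--     """Two declarative passes: first compute the cut positions where a new
--     contiguous run starts, then slice the list (and the position range)
--     between consecutive cuts."""
--     n = len(lst)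
--     cuts = [i for i in range(n) if i == 0 or lst[i] != lst[i - 1] + 1] + [n]
--     intervals = [lst[a:b] for a, b in zip(cuts, cuts[1:])]
--     intervals_inds = [list(range(a, b)) for a, b in zip(cuts, cuts[1:])]
--     return intervals, intervals_inds
-- ===== Notes on version B (the rewrite author's own statement) =====
-- stated objective: alternative
-- what changed: Replaces A's stateful forward loop with prev-tracking, current-interval buffers and explicit flushes by a two-phase declarative computation: first a comprehension collecting the cut positions where a new contiguous run starts, then slicing the list and the index range between consecutive cuts.
import Mathlib
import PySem

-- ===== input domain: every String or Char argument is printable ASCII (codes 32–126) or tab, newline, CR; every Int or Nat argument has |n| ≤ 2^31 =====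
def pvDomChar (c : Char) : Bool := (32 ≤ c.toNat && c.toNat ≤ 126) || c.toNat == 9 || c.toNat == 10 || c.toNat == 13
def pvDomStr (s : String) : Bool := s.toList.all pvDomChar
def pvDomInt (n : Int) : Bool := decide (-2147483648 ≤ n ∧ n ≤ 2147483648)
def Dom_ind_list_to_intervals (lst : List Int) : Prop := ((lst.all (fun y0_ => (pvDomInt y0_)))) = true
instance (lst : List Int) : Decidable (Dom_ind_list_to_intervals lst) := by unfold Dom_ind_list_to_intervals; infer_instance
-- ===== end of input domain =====

-- B replaces A's stateful loop (prev-tracking, current buffers, flushes) by a two-phase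
-- declarative computation: collect the cut positions where a new run starts, then slice
-- between consecutive cuts; objective: alternative (same O(n) cost).

-- ===== PORT A =====
-- the 'for ind, i in enumerate(lst[1:])' loop; state = (ind counter, prev_i, curr_interval,
-- curr_interval_inds, intervals, intervals_inds)
def indLoopA (xs : List Int) (ind prev : Int) (cur curInds : List Int)
    (ivs ivsInds : List (List Int)) : List (List Int) × List (List Int) :=
  match xs with
  | [] => (ivs ++ [cur], ivsInds ++ [curInds])
  | i :: rest =>
    if i = prev + 1 then
      indLoopA rest (ind + 1) i (cur ++ [i]) (curInds ++ [ind + 1]) ivs ivsInds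
    else
      indLoopA rest (ind + 1) i [i] [ind + 1] (ivs ++ [cur]) (ivsInds ++ [curInds])

def ind_list_to_intervals (lst : List Int) : List (List Int) × List (List Int) :=
  match lst with
  | [] => ([], [])
  | x :: rest => indLoopA rest 0 x [x] [0] [] []

-- ===== PORT B =====
-- Source B: cuts = [i for i in range(n) if i == 0 or lst[i] != lst[i-1]+1] + [n];
-- then slices lst[a:b] and ranges list(range(a,b)) over zip(cuts, cuts[1:]).
-- 'lst[i] != lst[i-1] + 1' is ported on Option via pyGet?; exact here because every i
-- reaching the comparison satisfies 1 ≤ i < n, so both lookups are in range (and at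
-- i == 0 the 'or' makes the comparison's value irrelevant, as in Python's short circuit).
def ind_list_to_intervals_alt (lst : List Int) : List (List Int) × List (List Int) :=
  let n : Int := lst.length
  let cuts : List Int :=
    ((PySem.List.pyRange 0 n 1).filter
      (fun i => i == 0 ||
        !(PySem.List.pyGet? lst i == (PySem.List.pyGet? lst (i - 1)).map (· + 1)))) ++ [n]
  let pairs := cuts.zip cuts.tail
  (pairs.map (fun ab => PySem.List.slice lst (some ab.1) (some ab.2)),
   pairs.map (fun ab => PySem.List.pyRange ab.1 ab.2 1))

-- ===== PRECONDITION & SPEC =====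
def Spec_ind_list_to_intervals (lst : List Int) (out : List (List Int) × List (List Int)) : Prop := out = ind_list_to_intervals_alt lst
instance (lst : List Int) (out : List (List Int) × List (List Int)) : Decidable (Spec_ind_list_to_intervals lst out) := by unfold Spec_ind_list_to_intervals; infer_instance

-- ===== CLAIM (what is proved, stated in full; the proofs are below) =====
def Claim_equal_ind_list_to_intervals : Prop := ∀ (lst : List Int), Dom_ind_list_to_intervals lst → Spec_ind_list_to_intervals lst (ind_list_to_intervals lst)

-- ===== LEMMAS AND PROOFS =====

-- length of the leading run continuing prev (prev+1, prev+2, …)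
def runCnt : Int → List Int → Nat
  | _, [] => 0
  | p, y :: ys => if y = p + 1 then runCnt y ys + 1 else 0

-- run lengths of the maximal contiguous runs
def splitLens : List Int → List Nat
  | [] => []
  | x :: xs => (runCnt x xs + 1) :: splitLens (xs.drop (runCnt x xs))
termination_by l => l.length
decreasing_by simp

def chop : List Int → List Nat → List (List Int)
  | _, [] => []
  | l, c :: cs => l.take c :: chop (l.drop c) cs

def rangeList : Int → Nat → List Int
  | _, 0 => []
  | s, n + 1 => s :: rangeList (s + 1) n

def posChop : Int → List Nat → List (List Int)
  | _, [] => []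
  | s, c :: cs => rangeList s c :: posChop (s + (c : Int)) cs

-- Nat-side partial sums of the run lengths = the cut positions
def psumsN : Nat → List Nat → List Nat
  | _, [] => []
  | s, c :: cs => s :: psumsN (s + c) cs

-- Nat-side form of the break predicate of Source B
def qB (lst : List Int) (k : Nat) : Bool :=
  k == 0 || !(lst[k]? == (lst[k - 1]?).map (· + 1))

theorem splitLens_nil : splitLens [] = [] := by rw [splitLens]

theorem splitLens_cons (x : Int) (xs : List Int) :
    splitLens (x :: xs) = (runCnt x xs + 1) :: splitLens (xs.drop (runCnt x xs)) := by
  rw [splitLens]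

-- ---- A's loop characterisation ----

theorem indLoopA_acc (xs : List Int) : ∀ (ind prev : Int) (cur curInds : List Int)
    (ivs ivsInds : List (List Int)),
    indLoopA xs ind prev cur curInds ivs ivsInds =
      (ivs ++ (indLoopA xs ind prev cur curInds [] []).1,
       ivsInds ++ (indLoopA xs ind prev cur curInds [] []).2) := by
  induction xs with
  | nil => intro ind prev cur curInds ivs ivsInds; simp [indLoopA]
  | cons i rest ih =>
    intro ind prev cur curInds ivs ivsInds
    by_cases h : i = prev + 1
    · simp only [indLoopA, if_pos h]
      exact ih ..
    · simp only [indLoopA, if_neg h]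
      rw [ih (ind + 1) i [i] [ind + 1] (ivs ++ [cur]) (ivsInds ++ [curInds]),
          ih (ind + 1) i [i] [ind + 1] ([] ++ [cur]) ([] ++ [curInds])]
      simp

theorem indLoopA_eq (xs : List Int) : ∀ (ind prev : Int) (cur curInds : List Int),
    indLoopA xs ind prev cur curInds [] [] =
      ((cur ++ xs.take (runCnt prev xs)) ::
         chop (xs.drop (runCnt prev xs)) (splitLens (xs.drop (runCnt prev xs))),
       (curInds ++ rangeList (ind + 1) (runCnt prev xs)) ::
         posChop (ind + 1 + (runCnt prev xs : Int)) (splitLens (xs.drop (runCnt prev xs)))) := by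
  induction xs with
  | nil =>
    intro ind prev cur curInds
    simp [indLoopA, runCnt, splitLens_nil, chop, posChop, rangeList]
  | cons i rest ih =>
    intro ind prev cur curInds
    by_cases h : i = prev + 1
    · have hc : runCnt prev (i :: rest) = runCnt i rest + 1 := by simp [runCnt, h]
      simp only [indLoopA, if_pos h]
      rw [ih, hc]
      simp only [List.take_succ_cons, List.drop_succ_cons, Prod.mk.injEq]
      constructor
      · simp
      · rw [show (ind + 1 + 1 + ((runCnt i rest : Int))) = ind + 1 + ((runCnt i rest + 1 : Nat) : Int) by push_cast; ring]
        simp [rangeList]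
    · have hc : runCnt prev (i :: rest) = 0 := by simp [runCnt, h]
      simp only [indLoopA, if_neg h]
      rw [indLoopA_acc, ih, hc]
      simp only [List.take_zero, List.drop_zero, splitLens_cons, chop, posChop,
        List.take_succ_cons, List.drop_succ_cons, Prod.mk.injEq]
      constructor
      · simp
      · rw [show (ind + 1 + 1 + ((runCnt i rest : Int))) = ind + 1 + (0 : Nat) + ((runCnt i rest + 1 : Nat) : Int) by push_cast; ring]
        simp [rangeList]

theorem portA_eq (lst : List Int) :
    ind_list_to_intervals lst = (chop lst (splitLens lst), posChop 0 (splitLens lst)) := by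
  cases lst with
  | nil => simp [ind_list_to_intervals, splitLens_nil, chop, posChop]
  | cons x xs =>
    simp only [ind_list_to_intervals]
    rw [indLoopA_eq, splitLens_cons]
    simp only [chop, posChop, List.take_succ_cons, List.drop_succ_cons, Prod.mk.injEq]
    constructor
    · simp
    · rw [show ((0 : Int) + 1 + ((runCnt x xs : Int))) = 0 + ((runCnt x xs + 1 : Nat) : Int) by push_cast; ring]
      simp [rangeList]

-- ---- run facts ----

theorem runCnt_le_length (ys : List Int) : ∀ p, runCnt p ys ≤ ys.length := by
  induction ys with
  | nil => intro p; simp [runCnt]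
  | cons y ys ih =>
    intro p
    simp only [runCnt, List.length_cons]
    split
    · have := ih y; omega
    · omega

theorem runCnt_get (ys : List Int) : ∀ p j, j < runCnt p ys → ys[j]? = some (p + 1 + j) := by
  induction ys with
  | nil => intro p j h; simp [runCnt] at h
  | cons y ys ih =>
    intro p j h
    by_cases hy : y = p + 1
    · cases j with
      | zero => simp [hy]
      | succ j' =>
        simp only [runCnt, if_pos hy] at h
        have := ih y j' (by omega)
        rw [List.getElem?_cons_succ, this, hy]
        congr 1
        push_cast; ring
    · simp [runCnt, hy] at h

theorem runCnt_stop (ys : List Int) : ∀ p y, ys[runCnt p ys]? = some y → y ≠ p + 1 + runCnt p ys := by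
  induction ys with
  | nil => intro p y h; simp at h
  | cons z zs ih =>
    intro p y h
    by_cases hz : z = p + 1
    · rw [show runCnt p (z :: zs) = runCnt z zs + 1 from by simp [runCnt, hz]] at h ⊢
      rw [List.getElem?_cons_succ] at h
      have := ih z y h
      intro hc
      apply this
      rw [hc, hz]
      push_cast; ring
    · rw [show runCnt p (z :: zs) = 0 from by simp [runCnt, hz]] at h ⊢
      simp only [List.getElem?_cons_zero, Option.some.injEq] at h
      subst h
      simpa using hz

theorem sum_splitLens (lst : List Int) : (splitLens lst).sum = lst.length := by
  induction lst using splitLens.induct with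
  | case1 => simp [splitLens_nil]
  | case2 x xs ih =>
    rw [splitLens_cons]
    have hle := runCnt_le_length xs x
    simp only [List.sum_cons, ih, List.length_drop, List.length_cons]
    omega

-- ---- the cut positions are the partial sums of the run lengths ----

theorem qB_in_run (x : Int) (xs : List Int) (j : Nat) (h1 : 1 ≤ j)
    (h2 : j ≤ runCnt x xs) : qB (x :: xs) j = false := by
  have hj : (x :: xs)[j]? = some (x + j) := by
    cases j with
    | zero => omega
    | succ j' =>
      have := runCnt_get xs x j' (by omega)
      rw [List.getElem?_cons_succ, this]
      congr 1
      push_cast; ring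
  have hj1 : (x :: xs)[j - 1]? = some (x + j - 1) := by
    cases j with
    | zero => omega
    | succ j' =>
      cases j' with
      | zero => simp
      | succ j'' =>
        have := runCnt_get xs x j'' (by omega)
        rw [Nat.add_sub_cancel, List.getElem?_cons_succ, this]
        congr 1
        push_cast; ring
  have hne : (j == 0) = false := by simp; omega
  simp [qB, hj, hj1, hne]

theorem qB_shift (x : Int) (xs : List Int) (k : Nat)
    (hk : runCnt x xs + 1 + k < (x :: xs).length) :
    qB (x :: xs) (runCnt x xs + 1 + k) = qB ((x :: xs).drop (runCnt x xs + 1)) k := by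
  cases k with
  | zero =>
    -- both sides are true: position runCnt+1 is a break, position 0 of the suffix always is
    have hlt : runCnt x xs < xs.length := by simp at hk; omega
    have hy : xs[runCnt x xs]? = some (xs[runCnt x xs]'hlt) := List.getElem?_eq_getElem hlt
    have hneq := runCnt_stop xs x _ hy
    have hcur : (x :: xs)[runCnt x xs + 1]? = some (xs[runCnt x xs]'hlt) := by
      simp [hy]
    have hprev : (x :: xs)[runCnt x xs]? = some (x + (runCnt x xs : Int)) := by
      rcases Nat.eq_zero_or_pos (runCnt x xs) with h0 | hpos
      · simp [h0]
      · have hg := runCnt_get xs x (runCnt x xs - 1) (by omega)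
        have hval : x + 1 + ((runCnt x xs - 1 : Nat) : Int) = x + (runCnt x xs : Int) := by
          omega
        rw [hval] at hg
        have hcm : runCnt x xs = (runCnt x xs - 1) + 1 := by omega
        conv_lhs => rw [hcm]
        rw [List.getElem?_cons_succ, hg]
    have hvne : (some (xs[runCnt x xs]'hlt) == some (x + (runCnt x xs : Int) + 1)) = false := by
      simp only [beq_eq_false_iff_ne, ne_eq, Option.some.injEq]
      intro hcon
      exact hneq (by rw [hcon]; ring)
    have hrhs : qB ((x :: xs).drop (runCnt x xs + 1)) 0 = true := by simp [qB]
    rw [Nat.add_zero, hrhs]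
    simp only [qB, Nat.add_sub_cancel, hcur, hprev, Option.map_some, hvne,
      Bool.not_false, Bool.or_true]
  | succ k' =>
    -- pure index shift: (drop c l)[k]? = l[c+k]?
    have e1 : ((x :: xs).drop (runCnt x xs + 1))[k' + 1]? =
        (x :: xs)[runCnt x xs + 1 + (k' + 1)]? := List.getElem?_drop ..
    have e2 : ((x :: xs).drop (runCnt x xs + 1))[k' + 1 - 1]? =
        (x :: xs)[runCnt x xs + 1 + (k' + 1) - 1]? := by
      rw [show runCnt x xs + 1 + (k' + 1) - 1 = runCnt x xs + 1 + (k' + 1 - 1) from by omega]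
      exact List.getElem?_drop ..
    have hne1 : (runCnt x xs + 1 + (k' + 1) == 0) = false := by simp
    have hne2 : (k' + 1 == 0) = false := by simp
    simp only [qB, e1, e2, hne1, hne2]

theorem breaks_eq (lst : List Int) :
    (List.range lst.length).filter (qB lst) = psumsN 0 (splitLens lst) := by
  induction lst using splitLens.induct with
  | case1 => simp [splitLens_nil, psumsN]
  | case2 x xs ih =>
    rw [splitLens_cons]
    set c := runCnt x xs + 1 with hc
    have hle : c ≤ (x :: xs).length := by
      have := runCnt_le_length xs x
      simp; omega
    have hsplit : List.range (x :: xs).length =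
        List.range c ++ (List.range ((x :: xs).length - c)).map (c + ·) := by
      rw [← List.range_add]
      congr 1
      omega
    rw [hsplit, List.filter_append]
    -- first part: only 0 survives
    have h1 : (List.range c).filter (qB (x :: xs)) = [0] := by
      have h0 : qB (x :: xs) 0 = true := by simp [qB]
      rw [hc, List.range_succ_eq_map, List.filter_cons, if_pos h0, List.filter_map]
      have hnil : (List.range (runCnt x xs)).filter (qB (x :: xs) ∘ Nat.succ) = [] := by
        rw [List.eq_nil_iff_forall_not_mem]
        intro a ha
        simp only [List.mem_filter, List.mem_range, Function.comp] at ha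
        obtain ⟨hltb, hq⟩ := ha
        rw [Nat.succ_eq_add_one, qB_in_run x xs (a + 1) (by omega) (by omega)] at hq
        exact absurd hq (by simp)
      rw [hnil, List.map_nil]
    rw [h1]
    -- second part: shift
    have h2 : ((List.range ((x :: xs).length - c)).map (c + ·)).filter (qB (x :: xs)) =
        ((List.range ((x :: xs).length - c)).filter (qB ((x :: xs).drop c))).map (c + ·) := by
      rw [List.filter_map]
      congr 1
      apply List.filter_congr
      intro k hk
      simp only [List.mem_range] at hk
      simp only [Function.comp]
      exact qB_shift x xs k (by omega)
    rw [h2]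
    have hdrop : (x :: xs).drop c = xs.drop (runCnt x xs) := by
      simp [hc]
    have hlen : (x :: xs).length - c = (xs.drop (runCnt x xs)).length := by
      have := runCnt_le_length xs x
      simp only [List.length_cons, List.length_drop, hc]
      omega
    rw [hdrop, hlen, ih]
    -- psumsN shift
    have hmap : ∀ (L : List Nat) (t s : Nat), (psumsN t L).map (s + ·) = psumsN (s + t) L := by
      intro L
      induction L with
      | nil => intro t s; simp [psumsN]
      | cons a L ihL =>
        intro t s
        simp only [psumsN, List.map_cons, List.cons.injEq, true_and]
        rw [ihL, ← Nat.add_assoc]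
    rw [hmap]
    simp [psumsN, hc]

-- ---- assembling slices between consecutive cuts ----

theorem pyRange_eq_rangeList (c : Nat) : ∀ (s : Int),
    PySem.List.pyRange s (s + (c : Int)) 1 = rangeList s c := by
  induction c with
  | zero => intro s; simp [rangeList]
  | succ c' ih =>
    intro s
    rw [PySem.List.pyRange_one_cons (by omega)]
    have : s + ((c' + 1 : Nat) : Int) = (s + 1) + (c' : Int) := by push_cast; ring
    rw [this, ih (s + 1)]
    simp [rangeList]

theorem assemble (L : List Nat) : ∀ (s : Nat) (lst : List Int), s + L.sum = lst.length →
    ((((psumsN s L).map (fun k : Nat => (k : Int)) ++ [(lst.length : Int)]).zip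
        ((psumsN s L).map (fun k : Nat => (k : Int)) ++ [(lst.length : Int)]).tail).map
          (fun ab => PySem.List.slice lst (some ab.1) (some ab.2)) =
        chop (lst.drop s) L ∧
     (((psumsN s L).map (fun k : Nat => (k : Int)) ++ [(lst.length : Int)]).zip
        ((psumsN s L).map (fun k : Nat => (k : Int)) ++ [(lst.length : Int)]).tail).map
          (fun ab => PySem.List.pyRange ab.1 ab.2 1) =
        posChop (s : Int) L) := by
  induction L with
  | nil =>
    intro s lst hsum
    exact ⟨rfl, rfl⟩
  | cons c cs ih =>
    intro s lst hsum
    have hcast : ((s + c : Nat) : Int) = ((s : Nat) : Int) + ((c : Nat) : Int) := by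
      push_cast; ring
    cases cs with
    | nil =>
      have hn : lst.length = s + c := by simp at hsum; omega
      constructor
      · show [PySem.List.slice lst (some ((s : Nat) : Int)) (some ((lst.length : Nat) : Int))] = _
        rw [hn, hcast, PySem.List.slice_natCast_add]
        show _ = (lst.drop s).take c :: chop ((lst.drop s).drop c) []
        rw [chop]
      · show [PySem.List.pyRange ((s : Nat) : Int) ((lst.length : Nat) : Int) 1] = _
        rw [hn, hcast, pyRange_eq_rangeList]
        show _ = rangeList (s : Int) c :: posChop ((s : Int) + (c : Int)) []
        rw [posChop]
    | cons c' cs' =>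
      have hsum' : (s + c) + (c' :: cs').sum = lst.length := by simp at hsum ⊢; omega
      obtain ⟨ih1, ih2⟩ := ih (s + c) lst hsum'
      have hdd : (lst.drop s).drop c = lst.drop (s + c) := by
        rw [List.drop_drop, Nat.add_comm]
      constructor
      · show PySem.List.slice lst (some ((s : Nat) : Int)) (some (((s + c : Nat)) : Int)) ::
          (((psumsN (s + c) (c' :: cs')).map (fun k : Nat => (k : Int)) ++ [(lst.length : Int)]).zip
            ((psumsN (s + c) (c' :: cs')).map (fun k : Nat => (k : Int)) ++ [(lst.length : Int)]).tail).map
              (fun ab => PySem.List.slice lst (some ab.1) (some ab.2)) = _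
        rw [ih1, hcast, PySem.List.slice_natCast_add]
        show _ = (lst.drop s).take c :: chop ((lst.drop s).drop c) (c' :: cs')
        rw [hdd]
      · show PySem.List.pyRange ((s : Nat) : Int) (((s + c : Nat)) : Int) 1 ::
          (((psumsN (s + c) (c' :: cs')).map (fun k : Nat => (k : Int)) ++ [(lst.length : Int)]).zip
            ((psumsN (s + c) (c' :: cs')).map (fun k : Nat => (k : Int)) ++ [(lst.length : Int)]).tail).map
              (fun ab => PySem.List.pyRange ab.1 ab.2 1) = _
        rw [ih2, hcast, pyRange_eq_rangeList]
        rfl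

-- B's Int-side break predicate agrees with qB on in-range indices
theorem pred_eq_qB (lst : List Int) (k : Nat) (hk : k < lst.length) :
    ((((k : Int)) == (0 : Int)) ||
      !(PySem.List.pyGet? lst (k : Int) == (PySem.List.pyGet? lst ((k : Int) - 1)).map (· + 1)))
      = qB lst k := by
  cases k with
  | zero => simp [qB]
  | succ k' =>
    have h0 : (((k' + 1 : Nat) : Int) == (0 : Int)) = false := by
      simp only [beq_eq_false_iff_ne, ne_eq]
      omega
    have h0' : ((k' + 1 : Nat) == 0) = false := by simp
    have hidx : ((k' + 1 : Nat) : Int) - 1 = ((k' : Nat) : Int) := by push_cast; ring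
    simp only [qB, h0, h0', Bool.false_or, hidx, PySem.List.pyGet?_natCast,
      Nat.add_sub_cancel]

theorem portB_eq (lst : List Int) :
    ind_list_to_intervals_alt lst = (chop lst (splitLens lst), posChop 0 (splitLens lst)) := by
  unfold ind_list_to_intervals_alt
  have hfil : (PySem.List.pyRange 0 (lst.length : Int) 1).filter
      (fun i => (i == (0 : Int)) ||
        !(PySem.List.pyGet? lst i == (PySem.List.pyGet? lst (i - 1)).map (· + 1))) =
      (psumsN 0 (splitLens lst)).map (fun k : Nat => (k : Int)) := by
    rw [PySem.List.pyRange_zero_natCast, List.filter_map]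
    rw [List.filter_congr (fun k hk => by
      simp only [Function.comp]
      exact pred_eq_qB lst k (List.mem_range.mp hk))]
    rw [breaks_eq]
  simp only [hfil]
  obtain ⟨h1, h2⟩ := assemble (splitLens lst) 0 lst (by simpa using sum_splitLens lst)
  simp only [List.drop_zero, Nat.cast_zero] at h1 h2
  rw [h1, h2]

-- ===== VERDICT (by name: the statement is the Claim_ definition above) =====
theorem ind_list_to_intervals_spec : Claim_equal_ind_list_to_intervals := by
  intro lst _
  unfold Spec_ind_list_to_intervals
  rw [portA_eq, portB_eq]
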